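-- pv_equiv track=rewrite | github.com/Shreel-Patel/Finai | src/agent/intent_parser.py | _is_buy_sell_recommendation
-- ===== SOURCE A (Python) =====
-- def _is_buy_sell_recommendation(message: str) -> bool:
--     """True if the user is asking whether to buy/sell (so we always run full_analysis + prediction)."""
--     msg_lower = message.strip().lower()
--     phrases = (
--         "should i buy", "should i sell", "buy or sell", "sell or buy",
--         "recommendation", "recommend ", "predict", "prediction",
--         "buy/sell", "sell/buy", "should i invest", "worth buying", "worth selling",
--     )
--     return any(p in msg_lower for p in phrases)
-- ===== SOURCE B (Python) =====
-- _PHRASES = (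
--     "should i buy", "should i sell", "buy or sell", "sell or buy",
--     "recommendation", "recommend ", "predict", "prediction",
--     "buy/sell", "sell/buy", "should i invest", "worth buying", "worth selling",
-- )
--
-- def _is_buy_sell_recommendation(message: str) -> bool:
--     """Single left-to-right pass: at each position, test whether any phrase starts there."""
--     msg = message.strip().lower()
--     for i in range(len(msg)):
--         for p in _PHRASES:
--             if msg.startswith(p, i):
--                 return True
--     return False
-- ===== Notes on version B (the rewrite author's own statement) =====
-- stated objective: alternative
-- what changed: Replaces the 13 independent full-message substring scans with a single left-to-right pass over the normalized message that tests at each position whether any phrase starts there.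
import Mathlib
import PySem

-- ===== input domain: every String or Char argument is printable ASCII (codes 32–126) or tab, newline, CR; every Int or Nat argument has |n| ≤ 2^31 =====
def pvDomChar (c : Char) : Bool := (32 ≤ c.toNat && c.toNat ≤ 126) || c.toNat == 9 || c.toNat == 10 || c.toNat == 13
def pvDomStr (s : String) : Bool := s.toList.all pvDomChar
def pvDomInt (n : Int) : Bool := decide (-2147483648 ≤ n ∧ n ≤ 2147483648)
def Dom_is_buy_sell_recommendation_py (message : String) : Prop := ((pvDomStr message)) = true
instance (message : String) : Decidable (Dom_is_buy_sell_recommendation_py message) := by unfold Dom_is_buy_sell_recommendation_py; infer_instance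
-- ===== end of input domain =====

-- B replaces 13 independent substring scans with one left-to-right pass testing each position; same result, same asymptotic cost.
-- ===== PORT A =====
def pvPhrasesA : List String :=
  ["should i buy", "should i sell", "buy or sell", "sell or buy",
   "recommendation", "recommend ", "predict", "prediction",
   "buy/sell", "sell/buy", "should i invest", "worth buying", "worth selling"]

def is_buy_sell_recommendation_py (message : String) : Bool :=
  let msg_lower := PySem.Str.lower (PySem.Str.strip message)
  pvPhrasesA.any (fun p => PySem.Str.isIn p msg_lower)

-- ===== PORT B =====
def pvPhrasesB : List (List Char) :=
  ["should i buy".toList, "should i sell".toList, "buy or sell".toList, "sell or buy".toList,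
   "recommendation".toList, "recommend ".toList, "predict".toList, "prediction".toList,
   "buy/sell".toList, "sell/buy".toList, "should i invest".toList, "worth buying".toList,
   "worth selling".toList]

-- one pass: at each position (each suffix) test whether some phrase is a prefix there
def pvScanB : List Char → Bool
  | [] => false
  | c :: rest =>
      (pvPhrasesB.any (fun p => PySem.Chars.startswith (c :: rest) p)) || pvScanB rest

def is_buy_sell_recommendation_py_alt (message : String) : Bool :=
  pvScanB (PySem.Str.lower (PySem.Str.strip message)).toList

-- ===== PRECONDITION & SPEC =====
def Spec_is_buy_sell_recommendation_py (message : String) (out : Bool) : Prop := out = is_buy_sell_recommendation_py_alt message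
instance (message : String) (out : Bool) : Decidable (Spec_is_buy_sell_recommendation_py message out) := by unfold Spec_is_buy_sell_recommendation_py; infer_instance

-- ===== CLAIM (what is proved, stated in full; the proofs are below) =====
def Claim_equal_is_buy_sell_recommendation_py : Prop := ∀ (message : String), Dom_is_buy_sell_recommendation_py message → Spec_is_buy_sell_recommendation_py message (is_buy_sell_recommendation_py message)

-- ===== LEMMAS AND PROOFS =====

lemma pv_any_or {α : Type} (l : List α) (p q : α → Bool) :
    l.any (fun x => p x || q x) = (l.any p || l.any q) := by
  induction l with
  | nil => rfl
  | cons a t ih => simp [List.any_cons, ih]; ac_rfl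

lemma pv_isIn_cons (p : List Char) (c : Char) (rest : List Char) :
    PySem.Chars.isIn p (c :: rest)
      = (PySem.Chars.startswith (c :: rest) p || PySem.Chars.isIn p rest) := by
  rw [Bool.eq_iff_iff]
  simp [PySem.Chars.isIn_iff_infix, PySem.Chars.startswith_iff, List.infix_cons_iff]

lemma pv_scan_eq (s : List Char) :
    pvScanB s = pvPhrasesB.any (fun p => PySem.Chars.isIn p s) := by
  induction s with
  | nil => decide
  | cons c rest ih =>
      rw [pvScanB, ih]
      simp only [pv_isIn_cons]
      rw [pv_any_or]

-- ===== VERDICT (by name: the statement is the Claim_ definition above) =====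
theorem is_buy_sell_recommendation_py_spec : Claim_equal_is_buy_sell_recommendation_py := by
  intro message _
  unfold Spec_is_buy_sell_recommendation_py
  unfold is_buy_sell_recommendation_py is_buy_sell_recommendation_py_alt
  rw [pv_scan_eq]
  simp [pvPhrasesA, pvPhrasesB]
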